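-- pv_equiv track=rewrite | github.com/daniel-reich/ubiquitous-fiesta | YrNbakR7Y4vLz6bFs_13.py | combinator
-- ===== SOURCE A (Python) =====
-- def combinator(lst,p = None,s = ''):
--     ans = []
--     last = (len(lst) == 1)
--     n = len(lst[0])
--     for i in range(n):
--         letter = s + lst[0][i]
--         if last:
--             ans.append(letter)
--         else:
--             ans += combinator(lst[1:],p,letter + p if p else letter)
--     return ans
-- ===== SOURCE B (Python) =====
-- def combinator(lst, p=None, s=''):
--     sep = p if p else ''
--     results = [s]
--     for idx, word in enumerate(lst):
--         tail = sep if idx < len(lst) - 1 else ''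
--         results = [r + ch + tail for r in results for ch in word]
--     return results
-- ===== Notes on version B (the rewrite author's own statement) =====
-- stated objective: alternative
-- what changed: Replaces A's per-level recursion on lst[1:] with a single iterative left fold that expands a list of accumulated prefixes once per word, appending the separator only for non-final words.
-- outside the precondition, e.g. on combinator([], None, ''): A raises IndexError, B returns ['']
import Mathlib
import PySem

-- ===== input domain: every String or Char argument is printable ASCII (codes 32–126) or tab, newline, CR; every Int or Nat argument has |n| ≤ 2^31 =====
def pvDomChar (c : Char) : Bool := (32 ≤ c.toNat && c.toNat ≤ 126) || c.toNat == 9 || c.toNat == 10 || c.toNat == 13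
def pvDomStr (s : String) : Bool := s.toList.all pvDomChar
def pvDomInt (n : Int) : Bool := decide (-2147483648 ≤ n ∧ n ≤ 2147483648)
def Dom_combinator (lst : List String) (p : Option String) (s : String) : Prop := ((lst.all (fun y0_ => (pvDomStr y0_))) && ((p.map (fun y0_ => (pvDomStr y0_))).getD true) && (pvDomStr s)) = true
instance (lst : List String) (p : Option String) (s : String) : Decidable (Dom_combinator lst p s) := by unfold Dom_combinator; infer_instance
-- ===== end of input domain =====

-- B replaces A's recursion on lst[1:] by one iterative left fold that expands a list of
-- accumulated prefixes word by word (alternative decomposition, same output order).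

-- ===== PORT A =====
-- Literal port of A's recursion: loop over range(len(lst[0])), index lst[0][i],
-- recurse on lst[1:]. Python raises IndexError on lst == [] (excluded by Pre_);
-- the port returns [] there.
def combinator (lst : List String) (p : Option String) (s : String) : List String :=
  match lst with
  | [] => []  -- Python: lst[0] raises IndexError here; outside Pre_combinator
  | w :: rest =>
    (PySem.List.pyRange 0 (w.length : Int) 1).foldl (fun ans i =>
      let letter := s ++ String.ofList [PySem.List.pyGetD w.toList i ' ']
      if rest.isEmpty then
        ans ++ [letter]
      else
        ans ++ combinator rest p
          (match p with
           | some ps => if ps ≠ "" then letter ++ ps else letter  -- 'letter + p if p else letter'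
           | none => letter)) []
termination_by lst.length
decreasing_by simp

-- ===== PORT B =====
def combinator_alt (lst : List String) (p : Option String) (s : String) : List String :=
  let sep := match p with
             | some ps => if ps ≠ "" then ps else ""  -- 'sep = p if p else ""'
             | none => ""
  (PySem.List.enumerate lst).foldl (fun results iw =>
    let tail := if iw.1 < (lst.length : Int) - 1 then sep else ""
    results.flatMap (fun r => iw.2.toList.map (fun ch => r ++ String.ofList [ch] ++ tail))) [s]

-- ===== PRECONDITION & SPEC =====
-- Pre_ excludes only lst == [], where the Python A raises IndexError on lst[0].
def Pre_combinator (lst : List String) (p : Option String) (s : String) : Prop := lst ≠ []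
instance (lst : List String) (p : Option String) (s : String) : Decidable (Pre_combinator lst p s) := by unfold Pre_combinator; infer_instance
def pvWitness_combinator : List String × Option String × String := (["ab", "c"], some "-", "x")

def Spec_combinator (lst : List String) (p : Option String) (s : String) (out : List String) : Prop := out = combinator_alt lst p s
instance (lst : List String) (p : Option String) (s : String) (out : List String) : Decidable (Spec_combinator lst p s out) := by unfold Spec_combinator; infer_instance

-- ===== CLAIM (what is proved, stated in full; the proofs are below) =====
def Claim_equal_combinator : Prop := ∀ (lst : List String) (p : Option String) (s : String), Dom_combinator lst p s → Pre_combinator lst p s → Spec_combinator lst p s (combinator lst p s)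

-- ===== LEMMAS AND PROOFS =====

-- the separator both programs effectively append between non-final choices
def sepOf (p : Option String) : String :=
  match p with
  | some ps => if ps ≠ "" then ps else ""
  | none => ""

-- common characterisation: expand the words left to right, separator after non-final words
def mix (sep : String) : List String → String → List String
  | [], r => [r]
  | w :: ws, r =>
      w.toList.flatMap (fun c => mix sep ws (r ++ String.ofList [c] ++ (if ws.isEmpty then "" else sep)))

lemma letter_sep (p : Option String) (letter : String) :
    (match p with
     | some ps => if ps ≠ "" then letter ++ ps else letter
     | none => letter) = letter ++ sepOf p := by
  cases p with
  | none => simp [sepOf]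
  | some ps => by_cases h : ps = "" <;> simp [sepOf, h]

lemma combinator_eq_mix (p : Option String) :
    ∀ (lst : List String) (s : String), lst ≠ [] →
      combinator lst p s = mix (sepOf p) lst s := by
  intro lst
  induction lst with
  | nil => intro s h; exact absurd rfl h
  | cons w rest ih =>
    intro s _
    rw [combinator]
    rw [show ((w.length : Int)) = ((w.toList.length : Int)) by simp]
    cases rest with
    | nil =>
      refine (PySem.List.foldl_pyRange_zero_pyGetD' w.toList ' '
        (fun ans c => ans ++ [s ++ String.ofList [c]]) []).trans ?_
      rw [PySem.List.foldl_append_singleton_eq_map]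
      rw [List.map_eq_flatMap]
      simp [mix]
    | cons v vs =>
      refine (PySem.List.foldl_pyRange_zero_pyGetD' w.toList ' '
        (fun ans c => ans ++ combinator (v :: vs) p
          (match p with
           | some ps => if ps ≠ "" then (s ++ String.ofList [c]) ++ ps else s ++ String.ofList [c]
           | none => s ++ String.ofList [c])) []).trans ?_
      rw [PySem.List.foldl_append_eq_flatMap]
      conv_rhs => rw [mix]
      simp only [List.nil_append, List.isEmpty_cons, Bool.false_eq_true, if_false]
      refine List.flatMap_congr ?_
      intro c _
      rw [letter_sep, ih _ (by simp)]

lemma foldlB (sep : String) (total : Int) :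
    ∀ (ws : List String) (k : Int) (init : List String), k + (ws.length : Int) = total →
      (PySem.List.enumerate ws k).foldl (fun results iw =>
        let tail := if iw.1 < total - 1 then sep else ""
        results.flatMap (fun r => iw.2.toList.map (fun ch => r ++ String.ofList [ch] ++ tail))) init
      = init.flatMap (mix sep ws) := by
  intro ws
  induction ws with
  | nil =>
    intro k init _
    simp [PySem.List.enumerate_nil, mix]
  | cons w rest ih =>
    intro k init hk
    rw [PySem.List.enumerate_cons, List.foldl_cons]
    rw [ih (k + 1) _ (by simp only [List.length_cons] at hk; push_cast at hk ⊢; omega)]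
    have htail : (if k < total - 1 then sep else "") = (if rest.isEmpty then "" else sep) := by
      revert hk
      cases rest with
      | nil =>
        intro hk
        have h : ¬ k < total - 1 := by simp at hk; omega
        simp [h]
      | cons a b =>
        intro hk
        have h : k < total - 1 := by
          simp only [List.length_cons] at hk; push_cast at hk; omega
        simp [h]
    simp only [mix, htail, List.flatMap_assoc, List.flatMap_map]

lemma combinator_alt_eq_mix (lst : List String) (p : Option String) (s : String) :
    combinator_alt lst p s = mix (sepOf p) lst s := by
  unfold combinator_alt
  rw [show (match p with
           | some ps => if ps ≠ "" then ps else ""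
           | none => "") = sepOf p from rfl]
  rw [foldlB (sepOf p) (lst.length : Int) lst 0 [s] (by simp)]
  simp

-- ===== VERDICT (by name: the statement is the Claim_ definition above) =====
theorem combinator_spec : Claim_equal_combinator := by
  intro lst p s _ hpre
  unfold Spec_combinator
  rw [combinator_eq_mix p lst s hpre, combinator_alt_eq_mix]
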